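-- pv_equiv track=rewrite | github.com/Helsinki-NLP/lm-evaluation-harness | lm_eval/tasks/ntrex_doc/utils.py | _group_by_docids
-- ===== SOURCE A (Python) =====
-- from collections import defaultdict
-- from typing import Any, Dict, List, Tuple
--
-- def _group_by_docids(
--     src_lines: List[str],
--     tgt_lines: List[str],
--     docids: List[str],
-- ) -> Tuple[Dict[str, List[str]], Dict[str, List[str]], List[str]]:
--     if not (len(src_lines) == len(tgt_lines) == len(docids)):
--         raise ValueError(
--             "Mismatched line counts:\n"
--             f"  src:    {len(src_lines)}\n"
--             f"  tgt:    {len(tgt_lines)}\n"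
--             f"  docids: {len(docids)}"
--         )
--
--     src_docs: Dict[str, List[str]] = defaultdict(list)
--     tgt_docs: Dict[str, List[str]] = defaultdict(list)
--
--     doc_order: List[str] = []
--     seen = set()
--
--     for src, tgt, docid in zip(src_lines, tgt_lines, docids):
--         docid = docid.strip()
--         src = src.strip()
--         tgt = tgt.strip()
--
--         if not docid:
--             continue
--
--         if docid not in seen:
--             seen.add(docid)
--             doc_order.append(docid)
--
--         src_docs[docid].append(src)
--         tgt_docs[docid].append(tgt)
--
--     return src_docs, tgt_docs, doc_order
-- ===== SOURCE B (Python) =====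
-- from collections import defaultdict
-- from typing import Dict, List, Tuple
--
--
-- def _group_one(lines: List[str], docids: List[str]) -> Dict[str, List[str]]:
--     docs: Dict[str, List[str]] = defaultdict(list)
--     for line, docid in zip(lines, docids):
--         docid = docid.strip()
--         if docid:
--             docs[docid].append(line.strip())
--     return docs
--
--
-- def _group_by_docids(
--     src_lines: List[str],
--     tgt_lines: List[str],
--     docids: List[str],
-- ) -> Tuple[Dict[str, List[str]], Dict[str, List[str]], List[str]]:
--     if not (len(src_lines) == len(tgt_lines) == len(docids)):
--         raise ValueError(
--             "Mismatched line counts:\n"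
--             f"  src:    {len(src_lines)}\n"
--             f"  tgt:    {len(tgt_lines)}\n"
--             f"  docids: {len(docids)}"
--         )
--     src_docs = _group_one(src_lines, docids)
--     tgt_docs = _group_one(tgt_lines, docids)
--     return src_docs, tgt_docs, list(src_docs)
-- ===== Notes on version B (the rewrite author's own statement) =====
-- stated objective: simpler
-- what changed: A's single loop juggling four pieces of state (two dicts, a seen set and an explicit doc_order list) is replaced by a reusable one-dict grouping helper applied twice, with doc_order read off the dict's insertion order; the seen/doc_order bookkeeping disappears.
import Mathlib
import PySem

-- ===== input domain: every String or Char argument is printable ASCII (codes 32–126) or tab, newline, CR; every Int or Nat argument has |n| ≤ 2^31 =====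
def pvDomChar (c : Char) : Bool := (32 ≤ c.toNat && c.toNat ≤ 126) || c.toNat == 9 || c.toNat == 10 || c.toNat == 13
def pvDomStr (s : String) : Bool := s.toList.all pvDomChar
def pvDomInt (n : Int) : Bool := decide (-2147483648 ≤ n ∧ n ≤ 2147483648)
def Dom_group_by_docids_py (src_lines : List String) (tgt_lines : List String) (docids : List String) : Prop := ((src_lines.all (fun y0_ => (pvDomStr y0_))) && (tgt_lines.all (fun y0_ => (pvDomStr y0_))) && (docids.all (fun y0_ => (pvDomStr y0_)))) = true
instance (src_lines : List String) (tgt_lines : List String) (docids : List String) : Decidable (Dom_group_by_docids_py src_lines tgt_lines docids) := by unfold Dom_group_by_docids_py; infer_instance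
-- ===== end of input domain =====

-- B replaces A's four-state loop (two dicts + seen set + doc_order list) by a one-dict grouping
-- helper applied twice, reading doc_order off the dict's insertion-ordered keys (objective: simpler).

-- ===== PORT A =====
-- A's loop state: (src_docs, tgt_docs, doc_order, seen)
def pvAState : Type := PySem.Dict String (List String) × PySem.Dict String (List String) × List String × PySem.Set String

def pvAStep (st : pvAState) (p : String × String × String) : pvAState :=
  let docid := PySem.Str.strip p.2.2
  let src := PySem.Str.strip p.1
  let tgt := PySem.Str.strip p.2.1
  if docid = "" then st
  else
    let os : List String × PySem.Set String :=
      if st.2.2.2.contains docid then (st.2.2.1, st.2.2.2)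
      else (st.2.2.1 ++ [docid], st.2.2.2.add docid)
    (st.1.modify docid [] (· ++ [src]), st.2.1.modify docid [] (· ++ [tgt]), os.1, os.2)

def group_by_docids_py (src_lines : List String) (tgt_lines : List String) (docids : List String) : (List (String × List String)) × (List (String × List String)) × List String :=
  let r := (src_lines.zip (tgt_lines.zip docids)).foldl pvAStep
    (PySem.Dict.empty, PySem.Dict.empty, [], PySem.Set.empty)
  (r.1.items, r.2.1.items, r.2.2.1)

-- ===== PORT B =====
def pvGroupOneStep (d : PySem.Dict String (List String)) (p : String × String) : PySem.Dict String (List String) :=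
  let docid := PySem.Str.strip p.2
  if docid = "" then d else d.modify docid [] (· ++ [PySem.Str.strip p.1])

def pvGroupOne (lines : List String) (docids : List String) : PySem.Dict String (List String) :=
  (lines.zip docids).foldl pvGroupOneStep PySem.Dict.empty

def group_by_docids_py_alt (src_lines : List String) (tgt_lines : List String) (docids : List String) : (List (String × List String)) × (List (String × List String)) × List String :=
  let src_docs := pvGroupOne src_lines docids
  let tgt_docs := pvGroupOne tgt_lines docids
  (src_docs.items, tgt_docs.items, src_docs.keys)

-- ===== PRECONDITION & SPEC =====
-- A raises ValueError when the three lists have different lengths; Pre_ excludes exactly that.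
def Pre_group_by_docids_py (src_lines : List String) (tgt_lines : List String) (docids : List String) : Prop :=
  src_lines.length = tgt_lines.length ∧ tgt_lines.length = docids.length
instance (src_lines : List String) (tgt_lines : List String) (docids : List String) : Decidable (Pre_group_by_docids_py src_lines tgt_lines docids) := by unfold Pre_group_by_docids_py; infer_instance

def pvWitness_group_by_docids_py : List String × List String × List String :=
  ([" a ", "b"], ["c", "d"], ["doc1", " doc1"])

def Spec_group_by_docids_py (src_lines : List String) (tgt_lines : List String) (docids : List String) (out : (List (String × List String)) × (List (String × List String)) × List String) : Prop := out = group_by_docids_py_alt src_lines tgt_lines docids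
instance (src_lines : List String) (tgt_lines : List String) (docids : List String) (out : (List (String × List String)) × (List (String × List String)) × List String) : Decidable (Spec_group_by_docids_py src_lines tgt_lines docids out) := by unfold Spec_group_by_docids_py; infer_instance

-- ===== CLAIM (what is proved, stated in full; the proofs are below) =====
def Claim_equal_group_by_docids_py : Prop := ∀ (src_lines : List String) (tgt_lines : List String) (docids : List String), Dom_group_by_docids_py src_lines tgt_lines docids → Pre_group_by_docids_py src_lines tgt_lines docids → Spec_group_by_docids_py src_lines tgt_lines docids (group_by_docids_py src_lines tgt_lines docids)

-- ===== LEMMAS AND PROOFS =====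

-- A's combined loop, started in a coherent state (doc_order = keys of src_docs, seen ≡ keys of
-- src_docs as a set), computes B's two independent groupings, with doc_order = final keys.
theorem pvLoop_eq (ds : List String) : ∀ (src tgt : List String)
    (sd td : PySem.Dict String (List String)) (seen : PySem.Set String),
    src.length = ds.length → tgt.length = ds.length →
    (∀ x, x ∈ seen ↔ sd.contains x = true) →
    (src.zip (tgt.zip ds)).foldl pvAStep (sd, td, sd.keys, seen) =
      ((src.zip ds).foldl pvGroupOneStep sd,
       (tgt.zip ds).foldl pvGroupOneStep td,
       ((src.zip ds).foldl pvGroupOneStep sd).keys,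
       ((src.zip (tgt.zip ds)).foldl pvAStep (sd, td, sd.keys, seen)).2.2.2) := by
  induction ds with
  | nil => intro src tgt sd td seen h1 h2 _; simp_all
  | cons d ds ih =>
    intro src tgt sd td seen h1 h2 hseen
    match src, tgt with
    | s :: src, t :: tgt =>
      simp only [List.length_cons] at h1 h2
      simp only [List.zip_cons_cons, List.foldl_cons]
      by_cases hd : PySem.Str.strip d = ""
      · have hA : pvAStep (sd, td, sd.keys, seen) (s, t, d) = (sd, td, sd.keys, seen) := by
          simp [pvAStep, hd]
        have hB : ∀ (x : String) (dct : PySem.Dict String (List String)),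
            pvGroupOneStep dct (x, d) = dct := by
          intro x dct; simp [pvGroupOneStep, hd]
        rw [hA, hB, hB, ih src tgt sd td seen (by omega) (by omega) hseen]
      · have hBs : pvGroupOneStep sd (s, d) =
            sd.modify (PySem.Str.strip d) [] (· ++ [PySem.Str.strip s]) := by
          simp [pvGroupOneStep, hd]
        have hBt : pvGroupOneStep td (t, d) =
            td.modify (PySem.Str.strip d) [] (· ++ [PySem.Str.strip t]) := by
          simp [pvGroupOneStep, hd]
        by_cases hc : sd.contains (PySem.Str.strip d) = true
        · have hmem : PySem.Str.strip d ∈ seen := (hseen _).mpr hc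
          have hA : pvAStep (sd, td, sd.keys, seen) (s, t, d) =
              (sd.modify (PySem.Str.strip d) [] (· ++ [PySem.Str.strip s]),
               td.modify (PySem.Str.strip d) [] (· ++ [PySem.Str.strip t]), sd.keys, seen) := by
            simp [pvAStep, hd, hmem]
          have hkeys : (sd.modify (PySem.Str.strip d) [] (· ++ [PySem.Str.strip s])).keys = sd.keys := by
            rw [PySem.Dict.keys_modify, PySem.Dict.keys_insert_of_contains _ _ hc]
          rw [hA, hBs, hBt, ← hkeys]
          refine ih src tgt _ _ seen (by omega) (by omega) ?_
          intro x
          rw [hseen x, PySem.Dict.contains_modify]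
          by_cases hx : x = PySem.Str.strip d <;> simp [hx, hc]
        · have hmem : PySem.Str.strip d ∉ seen := fun h => hc ((hseen _).mp h)
          have hA : pvAStep (sd, td, sd.keys, seen) (s, t, d) =
              (sd.modify (PySem.Str.strip d) [] (· ++ [PySem.Str.strip s]),
               td.modify (PySem.Str.strip d) [] (· ++ [PySem.Str.strip t]),
               sd.keys ++ [PySem.Str.strip d], seen.add (PySem.Str.strip d)) := by
            simp [pvAStep, hd, hmem]
          have hkeys : (sd.modify (PySem.Str.strip d) [] (· ++ [PySem.Str.strip s])).keys =
              sd.keys ++ [PySem.Str.strip d] := by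
            rw [PySem.Dict.keys_modify,
              PySem.Dict.keys_insert_of_not_contains _ _ (by simpa using hc)]
          rw [hA, hBs, hBt, ← hkeys]
          refine ih src tgt _ _ _ (by omega) (by omega) ?_
          intro x
          rw [PySem.Set.mem_add, PySem.Dict.contains_modify]
          by_cases hx : x = PySem.Str.strip d <;> simp [hx, hseen x]

-- ===== VERDICT (by name: the statement is the Claim_ definition above) =====
theorem group_by_docids_py_spec : Claim_equal_group_by_docids_py := by
  intro src tgt ds _ hpre
  unfold Spec_group_by_docids_py group_by_docids_py group_by_docids_py_alt pvGroupOne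
  obtain ⟨h1, h2⟩ := hpre
  have := pvLoop_eq ds src tgt PySem.Dict.empty PySem.Dict.empty PySem.Set.empty
    (by omega) (by omega)
    (by intro x; simp [PySem.Set.empty, PySem.Dict.contains_empty])
  simp only [PySem.Dict.keys_empty] at this
  rw [this]
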